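-- pv_equiv track=rewrite | github.com/EmiGrima22/Parcial-Laboratorio-1 | funciones_insumos.py | buscar_coincidencias_caracteristicas
-- ===== SOURCE A (Python) =====
-- def separar_caracteristicas(lista_insumos:list):
--     """Separa un string de caracteristicas en caracteristicas individuales
--
--     Args:
--         lista_insumos (list): Lista de diccionarios de insumos
--     """
--     for insumo in lista_insumos:
--         insumo["caracteristicas"] = insumo["caracteristicas"].split("~")
--
-- def unir_caracteristicas(lista_insumos:list):
--     """Junta las caracteristicas separadas, en un string
--
--     Args:
--         lista_insumos (list): Lista de diccionarios de insumos
--     """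
--     for insumo in lista_insumos:
--         insumo["caracteristicas"] = "~".join(insumo["caracteristicas"])
--
-- def buscar_coincidencias_caracteristicas(lista_insumos:list, caracteristica_buscar:str) -> list:
--     """Busca coincidencias de caracteristicas y las guarda en una lista auxiliar
--
--     Args:
--         lista_insumos (list): Lista de diccionarios de insumos\n
--         elemento_buscar (str): La caracteristica a buscar
--
--     Returns:
--         list: La lista de insumos con las caracteristicas solicitadas
--     """
--     insumo_con_esas_caracteristicas = []
--
--     separar_caracteristicas(lista_insumos)
--
--     for insumo in lista_insumos:
--         if caracteristica_buscar in insumo["caracteristicas"]: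
--             insumo_con_esas_caracteristicas.append(insumo)
--
--     unir_caracteristicas(lista_insumos)
--
--     return insumo_con_esas_caracteristicas
-- ===== SOURCE B (Python) =====
-- def _contiene_token(caracteristicas: str, objetivo: str) -> bool:
--     """Streaming scan: walk the string once, comparing each '~'-delimited token
--     to objetivo as soon as it completes; early exit on the first match."""
--     token = ""
--     for ch in caracteristicas:
--         if ch == "~":
--             if token == objetivo:
--                 return True
--             token = ""
--         else:
--             token += ch
--     return token == objetivo
--
-- def buscar_coincidencias_caracteristicas(lista_insumos: list, caracteristica_buscar: str) -> list:
--     resultado = []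
--     for insumo in lista_insumos:
--         if _contiene_token(insumo["caracteristicas"], caracteristica_buscar):
--             resultado.append(insumo)
--     return resultado
-- ===== Notes on version B (the rewrite author's own statement) =====
-- stated objective: alternative
-- what changed: B replaces A's mutate-all/split/scan/rejoin pipeline (which materializes a token list inside every dict and writes it back) with a streaming character-level matcher: one pass over each characteristics string that compares each '~'-delimited token to the target as it completes, exits early on the first match, builds no token list and never mutates the input.
import Mathlib
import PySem

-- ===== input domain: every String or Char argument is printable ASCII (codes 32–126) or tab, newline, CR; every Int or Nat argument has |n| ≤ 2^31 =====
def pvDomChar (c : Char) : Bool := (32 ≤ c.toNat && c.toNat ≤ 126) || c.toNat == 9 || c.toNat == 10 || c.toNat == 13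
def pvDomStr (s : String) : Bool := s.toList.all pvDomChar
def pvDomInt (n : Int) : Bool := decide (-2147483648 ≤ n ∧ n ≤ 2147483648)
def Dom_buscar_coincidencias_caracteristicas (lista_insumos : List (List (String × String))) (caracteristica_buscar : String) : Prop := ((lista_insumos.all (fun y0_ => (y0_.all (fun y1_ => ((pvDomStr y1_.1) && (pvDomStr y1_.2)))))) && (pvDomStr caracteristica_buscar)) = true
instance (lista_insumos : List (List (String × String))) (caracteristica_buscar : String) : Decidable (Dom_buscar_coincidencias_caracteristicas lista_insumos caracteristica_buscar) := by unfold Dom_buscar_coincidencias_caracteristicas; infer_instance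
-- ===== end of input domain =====

-- B replaces A's mutate/split/scan/rejoin pipeline with a streaming per-character token matcher
-- (no token list built, no mutation, early exit); A transiently mutates the input dicts but
-- restores them before returning, so the RETURN VALUE is what is compared.

-- ===== PORT A =====
-- Python dict assignment d[k] = v on an existing key: overwrite in place (first matching pair; Pre_ keeps keys Nodup)
def pvDictSet (d : List (String × String)) (k v : String) : List (String × String) :=
  match d with
  | [] => [(k, v)]
  | p :: rest => if p.1 = k then (k, v) :: rest else p :: pvDictSet rest k v

-- separar_caracteristicas: insumo["caracteristicas"] becomes the split list; since the mutated value's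
-- type changes (str → list), the mutated state is modeled as the pair (dict, split tokens).
-- The separator "~" is the nonempty literal, so split? is always `some`; getD [] is never reached.
def separar_caracteristicas (lista_insumos : List (List (String × String))) :
    List ((List (String × String)) × List String) :=
  lista_insumos.map (fun insumo =>
    (insumo, (PySem.Str.split? ((List.lookup "caracteristicas" insumo).getD "") "~").getD []))

-- unir_caracteristicas: writes the re-joined string back into the dict (the returned list holds the
-- same — mutated then restored — dicts).
def unir_caracteristicas (p : (List (String × String)) × List String) : List (String × String) :=
  pvDictSet p.1 "caracteristicas" (PySem.Str.join "~" p.2)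

def buscar_coincidencias_caracteristicas (lista_insumos : List (List (String × String))) (caracteristica_buscar : String) : List (List (String × String)) :=
  -- insumo_con_esas_caracteristicas: the accumulator of the main loop
  ((separar_caracteristicas lista_insumos).foldl
      (fun acc p => if p.2.contains caracteristica_buscar then acc ++ [p] else acc) []).map
    unir_caracteristicas

-- ===== PORT B =====
-- _contiene_token: streaming scan over the characters; `token` is the current partial token,
-- each completed token is compared to objetivo at once ('return True' ported as short-circuit ||).
def pvContieneToken (objetivo : List Char) : List Char → List Char → Bool
  | [], token => token == objetivo
  | ch :: rest, token =>
      if ch = '~' then (token == objetivo) || pvContieneToken objetivo rest []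
      else pvContieneToken objetivo rest (token ++ [ch])

def buscar_coincidencias_caracteristicas_alt (lista_insumos : List (List (String × String))) (caracteristica_buscar : String) : List (List (String × String)) :=
  -- resultado: the accumulator of B's loop
  lista_insumos.foldl
    (fun resultado insumo =>
      if pvContieneToken caracteristica_buscar.toList
          ((List.lookup "caracteristicas" insumo).getD "").toList [] then
        resultado ++ [insumo]
      else resultado) []

-- ===== PRECONDITION & SPEC =====
-- Pre_ requires every insumo to have the key "caracteristicas" (A raises KeyError otherwise) and its
-- keys to be distinct: a duplicate-key association list does not represent any Python dict, so the
-- model's first-match lookup there is accidental.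
def Pre_buscar_coincidencias_caracteristicas (lista_insumos : List (List (String × String))) (caracteristica_buscar : String) : Prop :=
  ∀ insumo ∈ lista_insumos,
    (insumo.map Prod.fst).Nodup ∧ "caracteristicas" ∈ insumo.map Prod.fst
instance (lista_insumos : List (List (String × String))) (caracteristica_buscar : String) : Decidable (Pre_buscar_coincidencias_caracteristicas lista_insumos caracteristica_buscar) := by unfold Pre_buscar_coincidencias_caracteristicas; infer_instance

def pvWitness_buscar_coincidencias_caracteristicas : (List (List (String × String))) × String :=
  ([[("nombre", "martillo"), ("caracteristicas", "rojo~chico")], [("caracteristicas", "azul")]], "rojo")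

def Spec_buscar_coincidencias_caracteristicas (lista_insumos : List (List (String × String))) (caracteristica_buscar : String) (out : List (List (String × String))) : Prop := out = buscar_coincidencias_caracteristicas_alt lista_insumos caracteristica_buscar
instance (lista_insumos : List (List (String × String))) (caracteristica_buscar : String) (out : List (List (String × String))) : Decidable (Spec_buscar_coincidencias_caracteristicas lista_insumos caracteristica_buscar out) := by unfold Spec_buscar_coincidencias_caracteristicas; infer_instance

-- ===== CLAIM (what is proved, stated in full; the proofs are below) =====
def Claim_equal_buscar_coincidencias_caracteristicas : Prop := ∀ (lista_insumos : List (List (String × String))) (caracteristica_buscar : String), Dom_buscar_coincidencias_caracteristicas lista_insumos caracteristica_buscar → Pre_buscar_coincidencias_caracteristicas lista_insumos caracteristica_buscar → Spec_buscar_coincidencias_caracteristicas lista_insumos caracteristica_buscar (buscar_coincidencias_caracteristicas lista_insumos caracteristica_buscar)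

-- ===== LEMMAS AND PROOFS =====

-- intercalate absorbs one separator-joined split of the last block
lemma intercalate_last_merge (sep a b : List Char) :
    ∀ xs : List (List Char),
      List.intercalate sep (xs ++ [a, b]) = List.intercalate sep (xs ++ [a ++ sep ++ b])
  | [] => by simp [List.intercalate, List.intersperse]
  | x :: xs => by
    cases xs with
    | nil => simp [List.intercalate, List.intersperse]
    | cons y ys =>
      have h := intercalate_last_merge sep a b (y :: ys)
      simp only [List.cons_append, List.intercalate, List.intersperse] at h ⊢
      simp [h]

-- invariant of PySem.Chars.splitOn.go: joining the produced pieces restores the pending state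
lemma splitOn_go_join (sep : List Char) (hsep : sep ≠ []) :
    ∀ (fuel : Nat) (l cur : List Char) (acc : List (List Char)), l.length < fuel →
      List.intercalate sep (PySem.Chars.splitOn.go sep fuel l cur acc) =
        List.intercalate sep (acc.reverse ++ [cur.reverse ++ l]) := by
  intro fuel
  induction fuel with
  | zero => intro l cur acc h; omega
  | succ n ih =>
    intro l cur acc h
    cases l with
    | nil => simp [PySem.Chars.splitOn.go]
    | cons c rest =>
      have hsep1 : 1 ≤ sep.length := by
        cases sep with
        | nil => exact absurd rfl hsep
        | cons _ _ => simp
      by_cases hp : sep.isPrefixOf (c :: rest) = true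
      · have hpre : sep <+: (c :: rest) := List.isPrefixOf_iff_prefix.mp hp
        have hdrop : (List.drop sep.length (c :: rest)).length < n := by
          simp only [List.length_drop, List.length_cons] at *
          omega
        rw [PySem.Chars.splitOn.go]
        simp only [hp, if_true]
        rw [ih _ _ _ hdrop]
        obtain ⟨t, ht⟩ := hpre
        have hdropeq : List.drop sep.length (c :: rest) = t := by
          rw [← ht, List.drop_left]
        calc List.intercalate sep ((cur.reverse :: acc).reverse ++ [[].reverse ++ List.drop sep.length (c :: rest)])
            = List.intercalate sep (acc.reverse ++ [cur.reverse, t]) := by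
              rw [hdropeq]; simp
          _ = List.intercalate sep (acc.reverse ++ [cur.reverse ++ sep ++ t]) := by
              rw [intercalate_last_merge]
          _ = List.intercalate sep (acc.reverse ++ [cur.reverse ++ c :: rest]) := by
              rw [List.append_assoc, ht]
      · simp only [Bool.not_eq_true] at hp
        rw [PySem.Chars.splitOn.go]
        simp only [hp, Bool.false_eq_true, if_false]
        have hrest : rest.length < n := by
          simp only [List.length_cons] at h; omega
        rw [ih _ _ _ hrest]
        simp

-- '~'.join(s.split('~')) == s
lemma join_splitOn_chars (s : List Char) :
    PySem.Chars.join ['~'] (PySem.Chars.splitOn s ['~']) = s := by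
  unfold PySem.Chars.splitOn PySem.Chars.join
  rw [splitOn_go_join ['~'] (by simp) (s.length + 1) s [] [] (by omega)]
  simp [List.intercalate]

-- writing back the value the first matching pair already holds leaves the dict unchanged
lemma pvDictSet_lookup_eq (k v : String) :
    ∀ d : List (String × String), List.lookup k d = some v → pvDictSet d k v = d := by
  intro d
  induction d with
  | nil => intro h; simp [List.lookup] at h
  | cons p rest ih =>
    intro h
    rw [List.lookup] at h
    by_cases hk : p.1 = k
    · have : (k == p.1) = true := by simp [hk]
      rw [this] at h
      simp only [Option.some.injEq] at h
      simp only [pvDictSet, if_pos hk]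
      rw [← hk, ← h]
    · have : (k == p.1) = false := by
        simp only [beq_eq_false_iff_ne, ne_eq]
        exact fun hh => hk hh.symm
      rw [this] at h
      simp [pvDictSet, hk, ih h]

-- a present key yields a `some` lookup
lemma lookup_of_mem_keys (k : String) :
    ∀ d : List (String × String), k ∈ d.map Prod.fst → ∃ v, List.lookup k d = some v := by
  intro d
  induction d with
  | nil => intro h; simp at h
  | cons p rest ih =>
    intro h
    by_cases hk : k = p.1
    · exact ⟨p.2, by simp [List.lookup, hk]⟩
    · have hmem : k ∈ rest.map Prod.fst := by
        simp only [List.map_cons, List.mem_cons] at h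
        exact h.resolve_left hk
      obtain ⟨v, hv⟩ := ih hmem
      refine ⟨v, ?_⟩
      rw [List.lookup]
      have : (k == p.1) = false := by simp [hk]
      rw [this, hv]

-- rejoining restores the dict A mutated
lemma unir_restores (insumo : List (String × String))
    (hk : "caracteristicas" ∈ insumo.map Prod.fst) :
    unir_caracteristicas (insumo,
      (PySem.Str.split? ((List.lookup "caracteristicas" insumo).getD "") "~").getD []) = insumo := by
  obtain ⟨v, hv⟩ := lookup_of_mem_keys "caracteristicas" insumo hk
  have hjoin : PySem.Str.join "~" ((PySem.Str.split? v "~").getD []) = v := by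
    have hs : PySem.Chars.split? v.toList ['~'] = some (PySem.Chars.splitOn v.toList ['~']) := by
      simp [PySem.Chars.split?]
    have hb := PySem.Str.split?_map v "~"
    have htl : ("~" : String).toList = ['~'] := by decide
    rw [htl, hs] at hb
    cases hsp : PySem.Str.split? v "~" with
    | none => rw [hsp] at hb; simp at hb
    | some parts =>
      rw [hsp] at hb
      simp only [Option.map_some, Option.some.injEq] at hb
      simp only [Option.getD_some]
      apply String.toList_injective
      rw [PySem.Str.toList_join, htl, hb, join_splitOn_chars]
  simp only [unir_caracteristicas, hv, Option.getD_some, hjoin]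
  exact pvDictSet_lookup_eq _ _ _ hv

-- membership in the tokens produced by splitOn.go ↔ the streaming scanner accepts the pending state
lemma mem_splitOn_go_iff_scan (ct : List Char) :
    ∀ (fuel : Nat) (l cur : List Char) (acc : List (List Char)), l.length < fuel →
      (ct ∈ PySem.Chars.splitOn.go ['~'] fuel l cur acc ↔
        ct ∈ acc ∨ pvContieneToken ct l cur.reverse = true) := by
  intro fuel
  induction fuel with
  | zero => intro l cur acc h; omega
  | succ n ih =>
    intro l cur acc h
    cases l with
    | nil =>
      simp only [PySem.Chars.splitOn.go, pvContieneToken, List.mem_reverse, List.mem_cons,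
        beq_iff_eq]
      constructor
      · rintro (h1 | h2)
        · exact Or.inr (by simp [h1])
        · exact Or.inl h2
      · rintro (h1 | h2)
        · exact Or.inr h1
        · exact Or.inl (by simpa [eq_comm] using h2)
    | cons c rest =>
      have hrest : rest.length < n := by simp only [List.length_cons] at h; omega
      rw [PySem.Chars.splitOn.go]
      by_cases hp : c = '~'
      · have hpre : (['~'] : List Char).isPrefixOf (c :: rest) = true := by
          simp [List.isPrefixOf, hp]
        simp only [hpre, if_true]
        have hd : List.drop (['~'] : List Char).length (c :: rest) = rest := by simp
        rw [hd, ih rest [] (cur.reverse :: acc) hrest]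
        simp only [pvContieneToken, hp, if_true, List.mem_cons, List.reverse_nil,
          Bool.or_eq_true, beq_iff_eq]
        constructor
        · rintro ((h1 | h2) | h3)
          · exact Or.inr (Or.inl (by simp [h1]))
          · exact Or.inl h2
          · exact Or.inr (Or.inr h3)
        · rintro (h1 | h2 | h3)
          · exact Or.inl (Or.inr h1)
          · exact Or.inl (Or.inl (by simpa [eq_comm] using h2))
          · exact Or.inr h3
      · have hpre : (['~'] : List Char).isPrefixOf (c :: rest) = false := by
          simp [List.isPrefixOf]
          intro hq; exact absurd hq.symm hp
        simp only [hpre, Bool.false_eq_true, if_false]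
        rw [ih rest (c :: cur) acc hrest]
        simp [pvContieneToken, hp]

-- '~'-token membership delivered by split equals B's streaming scanner
lemma contains_eq_scan (ct s : List Char) :
    ((PySem.Chars.splitOn s ['~']).contains ct) = pvContieneToken ct s [] := by
  have h := mem_splitOn_go_iff_scan ct (s.length + 1) s [] [] (by omega)
  unfold PySem.Chars.splitOn
  simp only [List.not_mem_nil, false_or, List.reverse_nil] at h
  cases hc : pvContieneToken ct s [] with
  | true => simp [h, hc]
  | false =>
    rw [hc] at h
    simp [h]

-- the String-level predicate of A's loop equals B's scanner on the raw characteristics string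
lemma pred_eq (c v : String) :
    (((PySem.Str.split? v "~").getD []).contains c) = pvContieneToken c.toList v.toList [] := by
  have hs : PySem.Chars.split? v.toList ['~'] = some (PySem.Chars.splitOn v.toList ['~']) := by
    simp [PySem.Chars.split?]
  have hb := PySem.Str.split?_map v "~"
  have htl : ("~" : String).toList = ['~'] := by decide
  rw [htl, hs] at hb
  cases hsp : PySem.Str.split? v "~" with
  | none => rw [hsp] at hb; simp at hb
  | some parts =>
    rw [hsp] at hb
    simp only [Option.map_some, Option.some.injEq] at hb
    rw [← contains_eq_scan c.toList v.toList, ← hb]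
    have hmm : (c ∈ parts) ↔ (c.toList ∈ parts.map String.toList) := by
      simp only [List.mem_map]
      exact ⟨fun hm => ⟨c, hm, rfl⟩,
        fun ⟨x, hx, hxc⟩ => by rwa [String.toList_injective hxc] at hx⟩
    rw [Bool.eq_iff_iff]
    simpa using hmm

-- B as a filter by the scanner predicate
lemma alt_eq_filter (lista : List (List (String × String))) (c : String) :
    buscar_coincidencias_caracteristicas_alt lista c =
      lista.filter (fun insumo =>
        pvContieneToken c.toList ((List.lookup "caracteristicas" insumo).getD "").toList []) := by
  unfold buscar_coincidencias_caracteristicas_alt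
  rw [show (fun (res : List (List (String × String))) insumo =>
        if pvContieneToken c.toList ((List.lookup "caracteristicas" insumo).getD "").toList [] then
          res ++ [insumo] else res)
      = (fun res insumo => if (fun i =>
          pvContieneToken c.toList ((List.lookup "caracteristicas" i).getD "").toList []) insumo
          then res ++ [id insumo] else res) from rfl]
  rw [PySem.List.foldl_append_if]
  simp

-- A's filtered-and-rejoined pipeline equals the scanner filter
lemma pipeline_eq (c : String) :
    ∀ lista : List (List (String × String)),
      (∀ insumo ∈ lista, "caracteristicas" ∈ insumo.map Prod.fst) →
      ((separar_caracteristicas lista).filter (fun p => p.2.contains c)).map unir_caracteristicas =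
        lista.filter (fun insumo =>
          pvContieneToken c.toList ((List.lookup "caracteristicas" insumo).getD "").toList []) := by
  intro lista
  induction lista with
  | nil => intro _; rfl
  | cons insumo rest ih =>
    intro hPre
    have hkey := hPre insumo (by simp)
    have htail := fun i hi => hPre i (List.mem_cons_of_mem _ hi)
    simp only [separar_caracteristicas, List.map_cons] at *
    rw [List.filter_cons, List.filter_cons]
    by_cases hc : ((((PySem.Str.split? ((List.lookup "caracteristicas" insumo).getD "") "~").getD []).contains c) = true)
    · rw [if_pos hc, if_pos ((pred_eq c _).symm.trans hc)]
      rw [List.map_cons, unir_restores insumo hkey, ih htail]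
    · rw [if_neg hc, if_neg (fun hs => hc ((pred_eq c _).trans hs))]
      exact ih htail

-- ===== VERDICT (by name: the statement is the Claim_ definition above) =====
theorem buscar_coincidencias_caracteristicas_spec : Claim_equal_buscar_coincidencias_caracteristicas := by
  intro lista c _hDom hPre
  unfold Spec_buscar_coincidencias_caracteristicas
  unfold buscar_coincidencias_caracteristicas
  rw [show (fun (acc : List ((List (String × String)) × List String)) p =>
        if p.2.contains c then acc ++ [p] else acc)
      = (fun acc p => if (fun (q : (List (String × String)) × List String) => q.2.contains c) p
          then acc ++ [id p] else acc) from rfl]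
  rw [PySem.List.foldl_append_if]
  rw [List.map_id, List.nil_append]
  rw [alt_eq_filter]
  exact pipeline_eq c lista (fun i hi => (hPre i hi).2)
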